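-- pv_equiv track=rewrite | github.com/ACFHarbinger/WSmartPlus-Route | logic/src/policies/lin_kernighan_helsgaun_three/objective.py | split_tour_at_dummies
-- ===== SOURCE A (Python) =====
-- from typing import List, Optional, Tuple
--
-- DEPOT_NODE = 0  # Main depot (always index 0)
--
-- def is_dummy_depot(node: int, n_original: Optional[int] = None) -> bool:
--     """
--     Check if a node is a dummy depot.
--
--     Supports both legacy negative-index encoding and new augmented encoding.
--
--     Args:
--         node: Node index to check.
--         n_original: Original graph size (for augmented mode). If None,
--                     uses legacy negative-index check.
--
--     Returns:
--         True if node is a dummy depot, False otherwise.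
--
--     Examples:
--         >>> # Legacy mode (negative indices)
--         >>> is_dummy_depot(-1)
--         True
--         >>> is_dummy_depot(5)
--         False
--         >>>
--         >>> # Augmented mode (indices >= n_original)
--         >>> is_dummy_depot(5, n_original=5)
--         True
--         >>> is_dummy_depot(3, n_original=5)
--         False
--     """
--     if n_original is not None:
--         # Augmented mode: dummy depots are indices >= n_original
--         return node >= n_original
--     else:
--         # Legacy mode: dummy depots are negative indices
--         return node < 0
--
-- def split_tour_at_dummies(tour: List[int], n_original: Optional[int] = None) -> List[List[int]]:
--     """
--     Extract multi-route representation from a dummy-depot-encoded tour.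
--
--     Splits the tour at every occurrence of a real depot (0) or dummy depot.
--     Each sub-route contains only customer nodes.
--
--     Args:
--         tour: Closed tour with dummy depot markers.
--               Legacy example: [0, 3, 5, -1, 7, 2, -2, 9, 0]
--               Augmented example: [0, 3, 5, 6, 7, 2, 7, 9, 0] (n_original=6)
--         n_original: Original graph size (for augmented mode). If None,
--                     uses legacy negative-index detection.
--
--     Returns:
--         List of routes (no depot nodes).
--         Example: [[3, 5], [7, 2], [9]]
--     """
--     routes: List[List[int]] = []
--     current: List[int] = []
--
--     for node in tour:
--         if node == DEPOT_NODE or is_dummy_depot(node, n_original):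
--             if current:
--                 routes.append(current)
--                 current = []
--         else:
--             current.append(node)
--
--     if current:
--         routes.append(current)
--
--     return routes
-- ===== SOURCE B (Python) =====
-- from typing import List, Optional
--
-- DEPOT_NODE = 0
--
--
-- def split_tour_at_dummies(tour: List[int], n_original: Optional[int] = None) -> List[List[int]]:
--     # Two staged passes: (1) collect the indices of all separator nodes (depot or
--     # dummy depot), (2) slice the tour between consecutive separator positions
--     # (with virtual separators at -1 and len(tour)), keeping only non-empty slices.
--     if n_original is not None:
--         cuts = [i for i, v in enumerate(tour) if v == DEPOT_NODE or v >= n_original]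
--     else:
--         cuts = [i for i, v in enumerate(tour) if v == DEPOT_NODE or v < 0]
--     bounds = [-1] + cuts + [len(tour)]
--     return [tour[a + 1:b] for a, b in zip(bounds, bounds[1:]) if b - a > 1]
-- ===== Notes on version B (the rewrite author's own statement) =====
-- stated objective: alternative
-- what changed: Instead of A's single accumulator loop, B runs two staged passes: it first collects the list of separator indices via enumerate, then slices the tour between consecutive separator positions (virtual separators at -1 and len) with zip, keeping only non-empty slices.
import Mathlib
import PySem

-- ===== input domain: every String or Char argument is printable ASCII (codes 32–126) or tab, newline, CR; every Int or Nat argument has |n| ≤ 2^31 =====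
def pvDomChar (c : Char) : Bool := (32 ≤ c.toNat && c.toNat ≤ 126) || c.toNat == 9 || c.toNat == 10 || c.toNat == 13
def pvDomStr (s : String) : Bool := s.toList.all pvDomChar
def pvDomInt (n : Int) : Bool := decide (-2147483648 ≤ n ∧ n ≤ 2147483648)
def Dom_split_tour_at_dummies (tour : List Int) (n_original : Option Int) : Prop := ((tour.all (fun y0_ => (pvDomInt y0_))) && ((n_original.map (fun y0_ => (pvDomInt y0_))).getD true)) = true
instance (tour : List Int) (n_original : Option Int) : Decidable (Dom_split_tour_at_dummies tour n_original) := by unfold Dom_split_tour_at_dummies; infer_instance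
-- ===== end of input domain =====

-- B replaces A's accumulator loop by two staged passes (collect separator indices, then
-- slice between consecutive indices); alternative decomposition, proved equal on all inputs.


-- ===== PORT A =====
-- is_dummy_depot: legacy (negative) or augmented (>= n_original) dummy-depot test
def is_dummy_depot (node : Int) (n_original : Option Int) : Bool :=
  match n_original with
  | some n => decide (node ≥ n)
  | none => decide (node < 0)

-- A's for-loop, transliterated as structural recursion carrying (routes, current)
def splitLoopA (n_original : Option Int) (routes : List (List Int)) (current : List Int) :
    List Int → List (List Int)
  | [] => if current = [] then routes else routes ++ [current]
  | node :: rest =>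
    if node == 0 || is_dummy_depot node n_original then
      if current = [] then splitLoopA n_original routes [] rest
      else splitLoopA n_original (routes ++ [current]) [] rest
    else splitLoopA n_original routes (current ++ [node]) rest

def split_tour_at_dummies (tour : List Int) (n_original : Option Int) : List (List Int) :=
  splitLoopA n_original [] [] tour

-- ===== PORT B =====
-- B: pass 1 collects separator indices (the two comprehensions over enumerate),
-- pass 2 slices between consecutive bounds, keeping the non-empty slices.
def split_tour_at_dummies_alt (tour : List Int) (n_original : Option Int) : List (List Int) :=
  let cuts : List Int :=
    match n_original with
    | some n => (PySem.List.enumerate tour 0).filterMap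
        (fun iv => if iv.2 == 0 || decide (iv.2 ≥ n) then some iv.1 else none)
    | none => (PySem.List.enumerate tour 0).filterMap
        (fun iv => if iv.2 == 0 || decide (iv.2 < 0) then some iv.1 else none)
  let bounds : List Int := -1 :: (cuts ++ [(tour.length : Int)])
  (bounds.zip bounds.tail).filterMap
    (fun ab => if ab.2 - ab.1 > 1 then some (PySem.List.slice tour (some (ab.1 + 1)) (some ab.2)) else none)

-- ===== PRECONDITION & SPEC =====
def Spec_split_tour_at_dummies (tour : List Int) (n_original : Option Int) (out : List (List Int)) : Prop := out = split_tour_at_dummies_alt tour n_original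
instance (tour : List Int) (n_original : Option Int) (out : List (List Int)) : Decidable (Spec_split_tour_at_dummies tour n_original out) := by unfold Spec_split_tour_at_dummies; infer_instance

-- ===== CLAIM (what is proved, stated in full; the proofs are below) =====
def Claim_equal_split_tour_at_dummies : Prop := ∀ (tour : List Int) (n_original : Option Int), Dom_split_tour_at_dummies tour n_original → Spec_split_tour_at_dummies tour n_original (split_tour_at_dummies tour n_original)

-- ===== LEMMAS AND PROOFS =====

-- the separator predicate, shared by the proofs of both sides
def altSep (n_original : Option Int) (node : Int) : Bool :=
  match n_original with
  | some n => node == 0 || decide (node ≥ n)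
  | none => node == 0 || decide (node < 0)

-- middle-man: groupby-style splitting; both ports are proved equal to it
def altGo (p : Int → Bool) : List Int → List (List Int)
  | [] => []
  | x :: xs =>
    if p x then altGo p (xs.dropWhile p)
    else (x :: xs.takeWhile (fun y => !p y)) :: altGo p (xs.dropWhile (fun y => !p y))
  termination_by l => l.length
  decreasing_by
  · exact Nat.lt_succ_of_le (List.length_dropWhile_le _ _)
  · exact Nat.lt_succ_of_le (List.length_dropWhile_le _ _)

-- generic versions of B's two passes
def cutsOf (p : Int → Bool) (tour : List Int) : List Int :=
  (PySem.List.enumerate tour 0).filterMap (fun iv => if p iv.2 then some iv.1 else none)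

def segsOf (tour : List Int) (pairs : List (Int × Int)) : List (List Int) :=
  pairs.filterMap
    (fun ab => if ab.2 - ab.1 > 1 then some (PySem.List.slice tour (some (ab.1 + 1)) (some ab.2)) else none)

def segsFull (p : Int → Bool) (tour : List Int) : List (List Int) :=
  let bounds : List Int := -1 :: (cutsOf p tour ++ [(tour.length : Int)])
  segsOf tour (bounds.zip bounds.tail)

theorem alt_eq_segsFull (tour : List Int) (n_original : Option Int) :
    split_tour_at_dummies_alt tour n_original = segsFull (altSep n_original) tour := by
  cases n_original <;>
    simp [split_tour_at_dummies_alt, segsFull, segsOf, cutsOf, altSep]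

-- the two separator predicates coincide
theorem altSep_eq (n_original : Option Int) (x : Int) :
    (x == 0 || is_dummy_depot x n_original) = altSep n_original x := by
  cases n_original <;> simp [is_dummy_depot, altSep]

-- dropping a leading separator does not change the groupby result
theorem altGo_sep_cons (p : Int → Bool) (x : Int) (xs : List Int) (hx : p x = true) :
    altGo p (x :: xs) = altGo p xs := by
  rw [altGo, if_pos hx]
  cases xs with
  | nil => simp
  | cons y ys =>
    by_cases hy : p y = true
    · rw [List.dropWhile_cons_of_pos hy, altGo, if_pos hy]
    · rw [List.dropWhile_cons_of_neg hy]

-- what A's loop computes, expressed through altGo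
def loopSpec (p : Int → Bool) (current : List Int) : List Int → List (List Int)
  | [] => if current = [] then [] else [current]
  | x :: xs =>
    if p x then (if current = [] then [] else [current]) ++ altGo p xs
    else (current ++ x :: xs.takeWhile (fun y => !p y)) :: altGo p (xs.dropWhile (fun y => !p y))

theorem loopSpec_nil_eq (p : Int → Bool) (l : List Int) : loopSpec p [] l = altGo p l := by
  cases l with
  | nil => simp [loopSpec, altGo]
  | cons x xs =>
    by_cases hx : p x = true
    · simp [loopSpec, hx, altGo_sep_cons p x xs hx]
    · simp [loopSpec, hx, altGo]

theorem splitLoopA_eq (n_original : Option Int) (l : List Int) :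
    ∀ (routes : List (List Int)) (current : List Int),
      splitLoopA n_original routes current l = routes ++ loopSpec (altSep n_original) current l := by
  induction l with
  | nil =>
    intro routes current
    by_cases hc : current = [] <;> simp [splitLoopA, loopSpec, hc]
  | cons x xs ih =>
    intro routes current
    rw [splitLoopA, altSep_eq]
    by_cases hx : altSep n_original x = true
    · by_cases hc : current = []
      · rw [if_pos hx, if_pos hc, ih, loopSpec_nil_eq]
        simp [loopSpec, hx, hc]
      · rw [if_pos hx, if_neg hc, ih, loopSpec_nil_eq]
        simp [loopSpec, hx, hc]
    · rw [if_neg hx, ih routes (current ++ [x])]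
      congr 1
      have hne : current ++ [x] ≠ [] := by simp
      cases xs with
      | nil => simp [loopSpec, hne, hx, altGo]
      | cons y ys =>
        by_cases hy : altSep n_original y = true
        · have : (!altSep n_original y) = false := by simp [hy]
          simp only [loopSpec, hne, hy, List.takeWhile_cons, List.dropWhile_cons]
          simp [altGo_sep_cons _ y ys hy, hx]
        · have hy' : (!altSep n_original y) = true := by simp [hy]
          simp only [loopSpec, hy, hx, List.takeWhile_cons, List.dropWhile_cons]
          simp

-- ---- B = altGo ----

theorem enumerate_shift (xs : List Int) : ∀ s : Int,
    PySem.List.enumerate xs (s + 1) = (PySem.List.enumerate xs s).map (fun q => (q.1 + 1, q.2)) := by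
  induction xs with
  | nil => intro s; simp [PySem.List.enumerate_nil]
  | cons x xs ih =>
    intro s
    rw [PySem.List.enumerate_cons, PySem.List.enumerate_cons, List.map_cons, ← ih (s + 1)]

theorem cutsOf_cons (p : Int → Bool) (x : Int) (xs : List Int) :
    cutsOf p (x :: xs) = (if p x then [(0 : Int)] else []) ++ (cutsOf p xs).map (· + 1) := by
  unfold cutsOf
  have he := enumerate_shift xs 0
  rw [zero_add] at he
  rw [PySem.List.enumerate_cons, List.filterMap_cons, zero_add, he, List.filterMap_map]
  by_cases hp : p x = true
  · simp only [hp, if_true]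
    rw [List.map_filterMap]
    simp [Function.comp]
  · simp only [hp]
    rw [List.map_filterMap]
    simp

theorem cutsOf_nonneg (p : Int → Bool) (xs : List Int) : ∀ a ∈ cutsOf p xs, (0 : Int) ≤ a := by
  induction xs with
  | nil => simp [cutsOf, PySem.List.enumerate_nil]
  | cons x xs ih =>
    intro a ha
    rw [cutsOf_cons] at ha
    rcases List.mem_append.1 ha with h | h
    · split at h <;> simp_all
    · obtain ⟨b, hb, rfl⟩ := List.mem_map.1 h
      have := ih b hb; omega

theorem cutsOf_nil_of_all (p : Int → Bool) (xs : List Int) (h : ∀ z ∈ xs, p z = false) :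
    cutsOf p xs = [] := by
  induction xs with
  | nil => simp [cutsOf, PySem.List.enumerate_nil]
  | cons x xs ih =>
    rw [cutsOf_cons, ih (fun z hz => h z (List.mem_cons_of_mem _ hz))]
    simp [h x (List.mem_cons_self ..)]

theorem cutsOf_append_sep (p : Int → Bool) (t : List Int) (y : Int) (ys : List Int)
    (ht : ∀ z ∈ t, p z = false) (hy : p y = true) :
    cutsOf p (t ++ y :: ys) = (t.length : Int) :: (cutsOf p ys).map (· + ((t.length : Int) + 1)) := by
  induction t with
  | nil => simp [cutsOf_cons, hy]
  | cons z t ih =>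
    rw [List.cons_append, cutsOf_cons, ih (fun w hw => ht w (List.mem_cons_of_mem _ hw))]
    simp [ht z (List.mem_cons_self ..), List.map_map]

theorem slice_shift (pre rest : List Int) (a b : Int) (ha : 0 ≤ a) (hb : 0 ≤ b) :
    PySem.List.slice (pre ++ rest) (some (a + pre.length)) (some (b + pre.length)) =
      PySem.List.slice rest (some a) (some b) := by
  rw [PySem.List.slice_toNat _ (by positivity) (by positivity),
      PySem.List.slice_toNat _ ha hb]
  have h1 : (a + (pre.length : Int)).toNat = pre.length + a.toNat := by omega
  have h2 : (b + (pre.length : Int)).toNat - (pre.length + a.toNat) = b.toNat - a.toNat := by omega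
  rw [h1, h2, ← List.drop_drop, List.drop_left]

theorem segs_shift (pre rest : List Int) (l : List Int) (h : ∀ a ∈ l, (-1 : Int) ≤ a) :
    segsOf (pre ++ rest)
        (((l.map (· + (pre.length : Int))).zip ((l.map (· + (pre.length : Int))).tail))) =
      segsOf rest (l.zip l.tail) := by
  unfold segsOf
  rw [← List.map_tail, List.zip_map, List.filterMap_map]
  apply List.filterMap_congr
  intro q hq
  obtain ⟨q1, q2⟩ := q
  obtain ⟨h1, h2⟩ := List.of_mem_zip hq
  have ha : (-1 : Int) ≤ q1 := h _ h1
  have hb : (-1 : Int) ≤ q2 := h _ (List.mem_of_mem_tail h2)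
  simp only [Function.comp, Prod.map]
  by_cases hg : q2 - q1 > 1
  · rw [if_pos (by omega), if_pos hg]
    have hs := slice_shift pre rest (q1 + 1) q2 (by omega) (by omega)
    have e1 : q1 + (pre.length : Int) + 1 = q1 + 1 + (pre.length : Int) := by ring
    rw [e1, hs]
  · rw [if_neg (by omega), if_neg hg]

theorem bounds_ge (p : Int → Bool) (tour : List Int) :
    ∀ a ∈ (-1 :: (cutsOf p tour ++ [(tour.length : Int)])), (-1 : Int) ≤ a := by
  intro a ha
  rcases List.mem_cons.1 ha with rfl | ha
  · omega
  · rcases List.mem_append.1 ha with h | h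
    · have := cutsOf_nonneg p tour a h; omega
    · simp at h; omega

theorem segsOf_nil (tour : List Int) : segsOf tour [] = [] := rfl

theorem segsOf_cons (tour : List Int) (q : Int × Int) (qs : List (Int × Int)) :
    segsOf tour (q :: qs) =
      (if q.2 - q.1 > 1 then [PySem.List.slice tour (some (q.1 + 1)) (some q.2)] else []) ++
        segsOf tour qs := by
  by_cases hg : q.2 - q.1 > 1 <;> simp [segsOf, hg]

theorem segsFull_nil (p : Int → Bool) : segsFull p [] = [] := by
  simp [segsFull, cutsOf, PySem.List.enumerate_nil, segsOf]

theorem segsFull_eq_aux (p : Int → Bool) :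
    ∀ n (tour : List Int), tour.length ≤ n → segsFull p tour = altGo p tour := by
  intro n
  induction n with
  | zero =>
    intro tour h
    have : tour = [] := List.eq_nil_of_length_eq_zero (Nat.le_zero.1 h)
    subst this
    rw [segsFull_nil, altGo]
  | succ n ih =>
    intro tour h
    match tour with
    | [] => rw [segsFull_nil, altGo]
    | x :: xs =>
      have hxlen : xs.length ≤ n := by simpa using Nat.le_of_succ_le_succ (by simpa using h)
      by_cases hp : p x = true
      · -- the head is a separator: the pair (-1, 0) is empty, the rest shifts by 1
        have hcut : cutsOf p (x :: xs) = (0 : Int) :: (cutsOf p xs).map (· + 1) := by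
          have := cutsOf_append_sep p [] x xs (by simp) hp
          simpa using this
        have hM : (0 : Int) :: ((cutsOf p xs).map (· + 1) ++ [((x :: xs).length : Int)]) =
            List.map (· + 1) (-1 :: (cutsOf p xs ++ [(xs.length : Int)])) := by
          simp
        unfold segsFull
        dsimp only
        rw [hcut, List.cons_append, hM, List.tail_cons]
        have hs := segs_shift [x] xs (-1 :: (cutsOf p xs ++ [(xs.length : Int)])) (bounds_ge p xs)
        simp only [List.length_cons, List.length_nil, List.singleton_append,
          List.map_cons, List.tail_cons, List.zip_cons_cons] at hs ⊢
        norm_num at hs ⊢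
        rw [segsOf_cons] at *
        norm_num
        rw [hs]
        have hfull : segsFull p xs = segsOf xs
            ((-1 :: (cutsOf p xs ++ [(xs.length : Int)])).zip (cutsOf p xs ++ [(xs.length : Int)])) := rfl
        rw [← hfull, ih xs hxlen, altGo_sep_cons p x xs hp]
      · have hpf : p x = false := by simpa using hp
        cases hd : xs.dropWhile (fun y => !p y) with
        | nil =>
          -- no separator at all: the single pair (-1, len) yields the whole list
          have hall : ∀ z ∈ xs, p z = false := fun z hz => by
            simpa using List.dropWhile_eq_nil_iff.1 hd z hz
          have hc : cutsOf p (x :: xs) = [] := by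
            rw [cutsOf_cons, cutsOf_nil_of_all p xs hall]
            simp [hpf]
          have htw : xs.takeWhile (fun y => !p y) = xs := by
            have := List.takeWhile_append_dropWhile (p := fun y => !p y) (l := xs)
            rw [hd, List.append_nil] at this
            exact this
          unfold segsFull
          dsimp only
          rw [hc, altGo]
          simp only [hpf, Bool.false_eq_true, if_false, htw, hd, altGo]
          rw [List.nil_append, List.tail_cons, List.zip_cons_cons, List.zip_nil_right]
          rw [segsOf_cons]
          have hg : (((x :: xs).length : Int)) - (-1) > 1 := by
            simp [List.length_cons]
          rw [if_pos hg, segsOf_nil]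
          have hsl : PySem.List.slice (x :: xs) (some (-1 + 1)) (some ((x :: xs).length : Int)) =
              x :: xs := by
            norm_num
            rw [PySem.List.slice_to _ (by positivity)]
            have ht1 : (((xs.length : Int)) + 1).toNat = xs.length + 1 := by omega
            rw [ht1]
            simp [List.take_succ_cons]
          rw [hsl, List.append_nil]
        | cons y ys =>
          -- the head run [x, …] ends at the first separator y; the rest shifts
          have hy : p y = true := by
            have h2 := List.head_dropWhile_not (fun y => !p y) (l := xs) (by simp [hd])
            simpa [hd] using h2
          have ht : ∀ z ∈ x :: xs.takeWhile (fun y => !p y), p z = false := by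
            intro z hz
            rcases List.mem_cons.1 hz with rfl | hz
            · exact hpf
            · simpa using List.mem_takeWhile_imp hz
          have hxs : xs = xs.takeWhile (fun y => !p y) ++ y :: ys := by
            conv_lhs => rw [← List.takeWhile_append_dropWhile (p := fun y => !p y) (l := xs)]
            rw [hd]
          have hx2 : x :: xs = (x :: xs.takeWhile (fun y => !p y)) ++ y :: ys := by
            rw [List.cons_append, ← hxs]
          have hylen : ys.length ≤ n := by
            have := congrArg List.length hxs
            simp at this
            omega
          have hcut := cutsOf_append_sep p (x :: xs.takeWhile (fun y => !p y)) y ys ht hy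
          rw [← hx2] at hcut
          have hk1 : (1 : Int) ≤ ((x :: xs.takeWhile (fun y => !p y)).length : Int) := by
            simp
          set k : Int := ((x :: xs.takeWhile (fun y => !p y)).length : Int) with hkdef
          unfold segsFull
          dsimp only
          rw [hcut]
          have hM : ((cutsOf p ys).map (· + (k + 1)) ++ [((x :: xs).length : Int)]) =
              List.map (· + (k + 1)) (cutsOf p ys ++ [(ys.length : Int)]) := by
            rw [List.map_append]
            congr 1
            have hL : (((x :: xs).length : Int)) = (ys.length : Int) + (k + 1) := by
              rw [hkdef, hx2]
              push_cast [List.length_append, List.length_cons]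
              ring
            rw [hL]
            rfl
          rw [List.cons_append, hM, List.tail_cons]
          have hM2 : k :: List.map (· + (k + 1)) (cutsOf p ys ++ [(ys.length : Int)]) =
              List.map (· + (k + 1)) (-1 :: (cutsOf p ys ++ [(ys.length : Int)])) := by
            rw [List.map_cons]
            congr 1
            ring
          rw [hM2, List.map_cons, List.zip_cons_cons, segsOf_cons]
          have hg : (-1 + (k + 1)) - (-1) > 1 := by omega
          rw [if_pos hg]
          have hsl : PySem.List.slice (x :: xs) (some (-1 + 1)) (some (-1 + (k + 1))) =
              x :: xs.takeWhile (fun y => !p y) := by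
            have he : (-1 : Int) + (k + 1) = k := by ring
            rw [he]
            norm_num
            rw [PySem.List.slice_to _ (le_trans zero_le_one hk1)]
            rw [hkdef, Int.toNat_natCast]
            conv_lhs => rw [hx2]
            exact List.take_left
          rw [hsl]
          have hs := segs_shift ((x :: xs.takeWhile (fun y => !p y)) ++ [y]) ys
            (-1 :: (cutsOf p ys ++ [(ys.length : Int)])) (bounds_ge p ys)
          have hpre : ((x :: xs.takeWhile (fun y => !p y)) ++ [y]) ++ ys = x :: xs := by
            rw [List.append_assoc, List.singleton_append, ← hx2]
          have hlen2 : ((((x :: xs.takeWhile (fun y => !p y)) ++ [y]).length : Int)) = k + 1 := by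
            rw [hkdef]
            push_cast [List.length_append, List.length_cons, List.length_nil]
            ring
          rw [hpre, hlen2] at hs
          simp only [List.map_cons, List.tail_cons] at hs ⊢
          rw [hs]
          have hfull : segsFull p ys = segsOf ys
              ((-1 :: (cutsOf p ys ++ [(ys.length : Int)])).zip (cutsOf p ys ++ [(ys.length : Int)])) := rfl
          rw [← hfull, ih ys hylen]
          rw [altGo]
          simp only [hpf, Bool.false_eq_true, if_false, hd]
          rw [altGo_sep_cons p y ys hy]
          simp

theorem segsFull_eq_altGo (p : Int → Bool) : ∀ tour : List Int, segsFull p tour = altGo p tour :=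
  fun tour => segsFull_eq_aux p tour.length tour le_rfl

-- ===== VERDICT (by name: the statement is the Claim_ definition above) =====
theorem split_tour_at_dummies_spec : Claim_equal_split_tour_at_dummies := by
  intro tour n_original _
  unfold Spec_split_tour_at_dummies split_tour_at_dummies
  rw [splitLoopA_eq, loopSpec_nil_eq, alt_eq_segsFull, segsFull_eq_altGo]
  simp
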